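-- pv_equiv track=rewrite | github.com/rosanwang/beng202-CNV-detector | scripts/AG_v2.py | all_kmer_combinations
-- ===== SOURCE A (Python) =====
-- def all_kmer_combinations(kmer_sets):
--     '''
--     across all gaps in gap alignments, gets all combinations of cnv possibilities
--     '''
--     kmer_combinations = [[]]
--
--     for key, lists_for_key in kmer_sets.items():
--         new_combinations = []
--
--         for combo in kmer_combinations:
--             # don't pick any list from this key (keep combination as is)
--             new_combinations.append(combo)
--
--             # or, pick one of the lists from this key and add to the combination
--             for lst in lists_for_key:
--                 #key_lst = [key + lst[0]] # keep track of gap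
--                 new_combinations.append(combo + lst)
--
--         kmer_combinations = new_combinations
--
--     # Remove the empty combination
--     if kmer_combinations and len(kmer_combinations[0]) == 0:
--         kmer_combinations = kmer_combinations[1:]
--
--     return kmer_combinations
-- ===== SOURCE B (Python) =====
-- def all_kmer_combinations(kmer_sets):
--     '''
--     across all gaps in gap alignments, gets all combinations of cnv possibilities
--     '''
--     def rec(items):
--         # combinations over the remaining keys, built back-to-front:
--         # first key's choice varies slowest, the skip option first
--         if not items:
--             return [[]]
--         _, lists_for_key = items[0]
--         rest = rec(items[1:])
--         return [opt + combo for opt in [[]] + list(lists_for_key) for combo in rest]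
--     combos = rec(list(kmer_sets.items()))
--     # the first combination is always the all-skip empty one; drop it
--     return combos[1:]
-- ===== Notes on version B (the rewrite author's own statement) =====
-- stated objective: alternative
-- what changed: Replaces A's incremental accumulator (rebuilding the whole combination list key by key via nested append loops) with a back-to-front recursion over the keys that enumerates per-key options (skip first) like an itertools.product, concatenating each tuple of choices directly and dropping the leading all-skip empty combination.
import Mathlib
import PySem

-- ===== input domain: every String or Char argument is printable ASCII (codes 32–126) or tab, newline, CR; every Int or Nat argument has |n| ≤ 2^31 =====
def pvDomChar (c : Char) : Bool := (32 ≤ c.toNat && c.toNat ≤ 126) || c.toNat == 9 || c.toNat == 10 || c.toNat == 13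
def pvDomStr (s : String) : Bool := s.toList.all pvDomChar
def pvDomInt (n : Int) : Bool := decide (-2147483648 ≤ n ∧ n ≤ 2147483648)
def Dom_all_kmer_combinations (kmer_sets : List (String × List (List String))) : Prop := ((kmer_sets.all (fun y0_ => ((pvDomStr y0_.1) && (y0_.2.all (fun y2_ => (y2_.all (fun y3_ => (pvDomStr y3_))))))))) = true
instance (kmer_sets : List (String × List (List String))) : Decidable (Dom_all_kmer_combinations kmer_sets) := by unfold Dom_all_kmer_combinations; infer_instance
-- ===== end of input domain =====

-- B replaces A's incremental new_combinations accumulation by a back-to-front recursion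
-- over the keys that builds each combination per-key-option directly (objective: alternative).

-- ===== PORT A =====
-- A: fold over the dict items; for each existing combo append the skip choice and
-- then combo + lst for each list of the key; finally drop a leading empty combination.
def all_kmer_combinations (kmer_sets : List (String × List (List String))) : List (List String) :=
  let combos := kmer_sets.foldl
    (fun kmer_combinations kv =>
      kmer_combinations.foldl
        (fun new_combinations combo =>
          kv.2.foldl (fun nc lst => nc ++ [combo ++ lst]) (new_combinations ++ [combo]))
        [])
    [[]]
  -- Python: if kmer_combinations and len(kmer_combinations[0]) == 0: drop the first
  match combos with
  | [] :: rest => rest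
  | cs => cs

-- ===== PORT B =====
-- B's helper rec: combinations over the remaining keys, built back-to-front;
-- the skip option [] comes first for each key, the first key varies slowest.
def akcRec : List (String × List (List String)) → List (List String)
  | [] => [[]]
  | kv :: rest =>
      (([] : List String) :: kv.2).flatMap
        (fun opt => (akcRec rest).map (fun combo => opt ++ combo))

def all_kmer_combinations_alt (kmer_sets : List (String × List (List String))) : List (List String) :=
  (akcRec kmer_sets).drop 1

-- ===== PRECONDITION & SPEC =====
-- Pre_ excludes association lists with duplicate keys: A's argument is a Python dict,
-- which can never contain two entries with the same key.
def Pre_all_kmer_combinations (kmer_sets : List (String × List (List String))) : Prop :=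
  (kmer_sets.map Prod.fst).Nodup

instance (kmer_sets : List (String × List (List String))) : Decidable (Pre_all_kmer_combinations kmer_sets) := by unfold Pre_all_kmer_combinations; infer_instance

def pvWitness_all_kmer_combinations : (List (String × List (List String))) :=
  [("a", [["x"], ["y", "z"]]), ("b", [["u"]])]

def Spec_all_kmer_combinations (kmer_sets : List (String × List (List String))) (out : List (List String)) : Prop := out = all_kmer_combinations_alt kmer_sets
instance (kmer_sets : List (String × List (List String))) (out : List (List String)) : Decidable (Spec_all_kmer_combinations kmer_sets out) := by unfold Spec_all_kmer_combinations; infer_instance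

-- ===== CLAIM (what is proved, stated in full; the proofs are below) =====
def Claim_equal_all_kmer_combinations : Prop := ∀ (kmer_sets : List (String × List (List String))), Dom_all_kmer_combinations kmer_sets → Pre_all_kmer_combinations kmer_sets → Spec_all_kmer_combinations kmer_sets (all_kmer_combinations kmer_sets)

-- ===== LEMMAS AND PROOFS =====

-- A's innermost loop appends combo + lst for each lst to the accumulator.
theorem akc_inner (lists : List (List String)) (combo : List String) (acc : List (List String)) :
    lists.foldl (fun nc lst => nc ++ [combo ++ lst]) acc
      = acc ++ lists.map (fun lst => combo ++ lst) := by
  induction lists generalizing acc with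
  | nil => simp
  | cons l ls ih => simp [ih, List.append_assoc]

-- A's middle loop over the existing combinations is a flatMap over per-key options.
theorem akc_step (lists : List (List String)) (kc acc : List (List String)) :
    kc.foldl
        (fun new_combinations combo =>
          lists.foldl (fun nc lst => nc ++ [combo ++ lst]) (new_combinations ++ [combo]))
        acc
      = acc ++ kc.flatMap (fun combo => (([] : List String) :: lists).map (fun opt => combo ++ opt)) := by
  induction kc generalizing acc with
  | nil => simp
  | cons c cs ih =>
      rw [List.foldl_cons, akc_inner, ih]
      simp [List.append_assoc]

-- A's outer fold over the keys computes B's recursion, distributed over the seed.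
theorem akc_main (ks : List (String × List (List String))) (kc : List (List String)) :
    ks.foldl
        (fun kmer_combinations kv =>
          kmer_combinations.foldl
            (fun new_combinations combo =>
              kv.2.foldl (fun nc lst => nc ++ [combo ++ lst]) (new_combinations ++ [combo]))
            [])
        kc
      = kc.flatMap (fun c => (akcRec ks).map (fun x => c ++ x)) := by
  induction ks generalizing kc with
  | nil => simp [akcRec]
  | cons kv ks ih =>
      rw [List.foldl_cons, akc_step, List.nil_append, ih]
      simp [akcRec, List.flatMap_def, List.map_map, Function.comp_def, List.append_assoc,
        List.flatten_flatten]

-- B's recursion always starts with the all-skip empty combination.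
theorem akcRec_head (ks : List (String × List (List String))) :
    ∃ t, akcRec ks = [] :: t := by
  induction ks with
  | nil => exact ⟨[], rfl⟩
  | cons kv ks ih =>
      rcases ih with ⟨t, ht⟩
      refine ⟨t.map (fun x => x) ++ kv.2.flatMap (fun opt => (akcRec ks).map (fun c => opt ++ c)), ?_⟩
      simp [akcRec, ht]

-- ===== VERDICT (by name: the statement is the Claim_ definition above) =====
theorem all_kmer_combinations_spec : Claim_equal_all_kmer_combinations := by
  intro ks _ _
  unfold Spec_all_kmer_combinations all_kmer_combinations all_kmer_combinations_alt
  rcases akcRec_head ks with ⟨t, ht⟩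
  rw [akc_main, ht]
  simp
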